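-- pv_equiv track=rewrite | github.com/yingz1985/interview_Q | getUniqueUserIdSum.py | getUniqueUserIdSum
-- ===== SOURCE A (Python) =====
-- def getUniqueUserIdSum(arr):
--     sum_ = 0
--     count  = {}
--
--     newarr = []
--     for num in arr:
--         temp = num
--         while temp in count: #
--             temp = temp+1
--         count[temp]=1
--         newarr.append(temp)
--
--     for num in newarr:
--         sum_+=num
--     return sum_
-- ===== SOURCE B (Python) =====
-- def getUniqueUserIdSum(arr):
--     total = 0
--     prev = None
--     for v in sorted(arr):
--         cur = v if (prev is None or v > prev) else prev + 1
--         total += cur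
--         prev = cur
--     return total
-- ===== Notes on version B (the rewrite author's own statement) =====
-- stated objective: faster
-- what changed: Replaces the dict-probing loop (increment each id until unused, O(n^2) on duplicate-heavy input) by sort-then-one-pass: each assigned value is max(v, prev+1); the multiset of assigned slots is order-independent, so the sums agree.
import Mathlib
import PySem

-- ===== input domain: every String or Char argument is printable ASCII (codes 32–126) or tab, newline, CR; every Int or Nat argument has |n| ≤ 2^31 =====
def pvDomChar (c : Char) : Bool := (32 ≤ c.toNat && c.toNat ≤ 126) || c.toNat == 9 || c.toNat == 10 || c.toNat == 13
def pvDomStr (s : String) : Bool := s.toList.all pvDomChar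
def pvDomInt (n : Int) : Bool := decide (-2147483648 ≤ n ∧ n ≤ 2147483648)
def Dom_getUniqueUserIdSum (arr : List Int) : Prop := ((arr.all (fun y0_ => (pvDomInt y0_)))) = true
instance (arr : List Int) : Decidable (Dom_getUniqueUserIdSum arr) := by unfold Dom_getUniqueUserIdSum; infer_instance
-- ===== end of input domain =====

-- B replaces A's dict-probing loop by sort + one linear pass (cur = max(v, prev+1)); objective: faster.

-- ===== PORT A =====
-- the `while temp in count: temp = temp+1` loop; fuel `count.size + 1` always suffices (proved below)
def pvWhileA (count : PySem.Dict Int Int) : Nat → Int → Int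
  | 0, temp => temp
  | fuel+1, temp => if count.contains temp then pvWhileA count fuel (temp + 1) else temp

def pvAStep (st : PySem.Dict Int Int × List Int) (num : Int) : PySem.Dict Int Int × List Int :=
  let temp := pvWhileA st.1 (st.1.size + 1) num
  (st.1.insert temp 1, st.2 ++ [temp])

def getUniqueUserIdSum (arr : List Int) : Int :=
  let st := arr.foldl pvAStep (PySem.Dict.empty, ([] : List Int))
  st.2.foldl (fun s n => s + n) 0

-- ===== PORT B =====
def pvBStep (st : Int × Option Int) (v : Int) : Int × Option Int :=
  let cur := match st.2 with
    | none => v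
    | some p => if p < v then v else p + 1
  (st.1 + cur, some cur)

def getUniqueUserIdSum_alt (arr : List Int) : Int :=
  ((PySem.List.sorted arr (fun x => x) false).foldl pvBStep (0, none)).1

-- ===== PRECONDITION & SPEC =====
def Spec_getUniqueUserIdSum (arr : List Int) (out : Int) : Prop := out = getUniqueUserIdSum_alt arr
instance (arr : List Int) (out : Int) : Decidable (Spec_getUniqueUserIdSum arr out) := by unfold Spec_getUniqueUserIdSum; infer_instance

-- ===== CLAIM (what is proved, stated in full; the proofs are below) =====
def Claim_equal_getUniqueUserIdSum : Prop := ∀ (arr : List Int), Dom_getUniqueUserIdSum arr → Spec_getUniqueUserIdSum arr (getUniqueUserIdSum arr)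

-- ===== LEMMAS AND PROOFS =====

-- `probe S v`: the least t ≥ v with t ∉ S (the slot A's while-loop finds)
theorem probe_ex (S : Finset ℤ) (v : ℤ) : ∃ n : ℕ, v + (n : ℤ) ∉ S := by
  by_contra h
  push_neg at h
  have hsub : (Finset.range (S.card + 1)).image (fun n : ℕ => v + (n : ℤ)) ⊆ S := by
    intro x hx
    simp only [Finset.mem_image, Finset.mem_range] at hx
    obtain ⟨n, _, rfl⟩ := hx
    exact h n
  have hinj : Function.Injective (fun n : ℕ => v + (n : ℤ)) := by
    intro a b hab
    simp only at hab
    omega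
  have hcard := Finset.card_le_card hsub
  rw [Finset.card_image_of_injective _ hinj, Finset.card_range] at hcard
  omega

noncomputable def probe (S : Finset ℤ) (v : ℤ) : ℤ := v + (Nat.find (probe_ex S v) : ℤ)

theorem probe_not_mem (S : Finset ℤ) (v : ℤ) : probe S v ∉ S := Nat.find_spec (probe_ex S v)

theorem probe_ge (S : Finset ℤ) (v : ℤ) : v ≤ probe S v := by
  unfold probe; omega

theorem mem_of_lt_probe {S : Finset ℤ} {v t : ℤ} (h1 : v ≤ t) (h2 : t < probe S v) : t ∈ S := by
  have hm : (t - v).toNat < Nat.find (probe_ex S v) := by unfold probe at h2; omega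
  have h4 : v + (((t - v).toNat : ℕ) : ℤ) ∈ S := not_not.mp (Nat.find_min (probe_ex S v) hm)
  have hv : v + (((t - v).toNat : ℕ) : ℤ) = t := by omega
  rwa [hv] at h4

theorem probe_unique {S : Finset ℤ} {v t : ℤ} (h1 : v ≤ t) (h2 : t ∉ S)
    (h3 : ∀ s, v ≤ s → s < t → s ∈ S) : probe S v = t := by
  have hle : probe S v ≤ t := by
    have : v + ((t - v).toNat : ℤ) ∉ S := by
      have : v + ((t - v).toNat : ℤ) = t := by omega
      rw [this]; exact h2
    have := Nat.find_min' (probe_ex S v) this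
    unfold probe; omega
  have hge : t ≤ probe S v := by
    by_contra h
    push_neg at h
    exact probe_not_mem S v (h3 _ (probe_ge S v) h)
  omega

theorem probe_of_not_mem {S : Finset ℤ} {v : ℤ} (h : v ∉ S) : probe S v = v :=
  probe_unique le_rfl h (by intro s h1 h2; omega)

theorem probe_succ {S : Finset ℤ} {v : ℤ} (h : v ∈ S) : probe S v = probe S (v + 1) := by
  have h1 : v + 1 ≤ probe S v := by
    have := probe_ge S v
    have hne : probe S v ≠ v := fun he => probe_not_mem S v (by rw [he]; exact h)
    omega
  exact (probe_unique h1 (probe_not_mem S v)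
    (fun s hs1 hs2 => mem_of_lt_probe (by omega) hs2)).symm

-- the abstract step: insert the probed slot
noncomputable def mstep (S : Finset ℤ) (v : ℤ) : Finset ℤ := insert (probe S v) S

theorem probe_insert_ne {S : Finset ℤ} {a b : ℤ} (h : probe S b ≠ probe S a) :
    probe (insert (probe S a) S) b = probe S b := by
  apply probe_unique (probe_ge S b)
  · simp only [Finset.mem_insert]
    push_neg
    exact ⟨h, probe_not_mem S b⟩
  · intro s h1 h2
    exact Finset.mem_insert_of_mem (mem_of_lt_probe h1 h2)

theorem probe_insert_eq {S : Finset ℤ} {a b : ℤ} (h : probe S b = probe S a) :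
    probe (insert (probe S a) S) b = probe S (probe S a + 1) := by
  have hba : b ≤ probe S a := h ▸ probe_ge S b
  have hr := probe_ge S (probe S a + 1)
  apply probe_unique (by omega)
  · simp only [Finset.mem_insert]
    push_neg
    exact ⟨by have := probe_not_mem S (probe S a + 1); omega, probe_not_mem S (probe S a + 1)⟩
  · intro s h1 h2
    rcases lt_trichotomy s (probe S a) with hlt | heq | hgt
    · exact Finset.mem_insert_of_mem (mem_of_lt_probe h1 (h ▸ hlt))
    · exact heq ▸ Finset.mem_insert_self _ _
    · exact Finset.mem_insert_of_mem (mem_of_lt_probe (by omega) h2)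

theorem mstep_comm (S : Finset ℤ) (a b : ℤ) : mstep (mstep S a) b = mstep (mstep S b) a := by
  unfold mstep
  by_cases h : probe S b = probe S a
  · rw [probe_insert_eq h, probe_insert_eq h.symm, h]
  · rw [probe_insert_ne h, probe_insert_ne (Ne.symm h), Finset.insert_comm]

theorem foldl_mstep_perm {l₁ l₂ : List ℤ} (h : l₁.Perm l₂) :
    ∀ S : Finset ℤ, l₁.foldl mstep S = l₂.foldl mstep S := by
  induction h with
  | nil => intro S; rfl
  | cons x _ ih => intro S; simp only [List.foldl_cons]; exact ih _
  | swap x y l => intro S; simp only [List.foldl_cons]; rw [mstep_comm]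
  | trans _ _ ih1 ih2 => intro S; rw [ih1, ih2]

-- ===== A-side: the dict loop realises `mstep` folds =====

-- invariant linking A's dict to the list of assigned ids
def ARel (count : PySem.Dict Int Int) (newarr : List Int) : Prop :=
  newarr.Nodup ∧ count.keys = newarr

theorem pvWhileA_eq {count : PySem.Dict Int Int} {S : Finset ℤ}
    (hc : ∀ t, count.contains t = true ↔ t ∈ S) :
    ∀ fuel temp, (probe S temp - temp).toNat < fuel →
      pvWhileA count fuel temp = probe S temp := by
  intro fuel
  induction fuel with
  | zero => intro temp h; omega
  | succ f ih =>
    intro temp h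
    by_cases hmem : count.contains temp = true
    · have htS : temp ∈ S := (hc temp).mp hmem
      have hps : probe S temp = probe S (temp + 1) := probe_succ htS
      have h1 : temp + 1 ≤ probe S temp := by
        have := probe_ge S temp
        have hne : probe S temp ≠ temp := fun he => probe_not_mem S temp (by rw [he]; exact htS)
        omega
      simp only [pvWhileA, hmem, if_true]
      rw [ih (temp + 1) (by rw [← hps]; omega), ← hps]
    · have : temp ∉ S := fun ht => hmem ((hc temp).mpr ht)
      simp only [pvWhileA, hmem, if_false]
      exact (probe_of_not_mem this).symm

theorem probe_sub_le_card (S : Finset ℤ) (v : ℤ) : (probe S v - v).toNat ≤ S.card := by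
  have hsub : Finset.Ico v (probe S v) ⊆ S := by
    intro t ht
    rw [Finset.mem_Ico] at ht
    exact mem_of_lt_probe ht.1 ht.2
  have := Finset.card_le_card hsub
  rwa [Int.card_Ico] at this

theorem aStep_spec {count : PySem.Dict Int Int} {newarr : List Int} (h : ARel count newarr)
    (num : Int) :
    pvAStep (count, newarr) num =
      (count.insert (probe newarr.toFinset num) 1, newarr ++ [probe newarr.toFinset num]) ∧
    ARel (count.insert (probe newarr.toFinset num) 1)
      (newarr ++ [probe newarr.toFinset num]) := by
  obtain ⟨hnd, hkeys⟩ := h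
  have hc : ∀ t, count.contains t = true ↔ t ∈ newarr.toFinset := by
    intro t
    rw [PySem.Dict.contains_iff_mem_keys, hkeys, List.mem_toFinset]
  have hsize : count.size = newarr.length := by
    have : count.keys.length = newarr.length := by rw [hkeys]
    simpa [PySem.Dict.keys] using this
  have hcard : newarr.toFinset.card = newarr.length := List.toFinset_card_of_nodup hnd
  have hfuel : (probe newarr.toFinset num - num).toNat < count.size + 1 := by
    have := probe_sub_le_card newarr.toFinset num
    omega
  have hwhile := pvWhileA_eq hc (count.size + 1) num hfuel
  have hnot : probe newarr.toFinset num ∉ newarr := by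
    have := probe_not_mem newarr.toFinset num
    simpa [List.mem_toFinset] using this
  have hcc : count.contains (probe newarr.toFinset num) = false := by
    cases hb : count.contains (probe newarr.toFinset num) with
    | false => rfl
    | true => exact absurd ((hc _).mp hb) (by simpa [List.mem_toFinset] using hnot)
  refine ⟨by simp only [pvAStep, hwhile], ?_, ?_⟩
  · simp only [List.nodup_append, List.nodup_cons, List.not_mem_nil, not_false_iff,
      List.nodup_nil, and_true, true_and]
    refine ⟨hnd, ?_⟩
    intro a ha b hb
    simp only [List.mem_cons, List.not_mem_nil, or_false] at hb
    exact fun he => hnot ((he.trans hb) ▸ ha)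
  · rw [PySem.Dict.keys_insert_of_not_contains count 1 hcc, hkeys]

theorem aLoop_spec (arr : List Int) :
    ∀ count newarr, ARel count newarr →
      ARel (arr.foldl pvAStep (count, newarr)).1 (arr.foldl pvAStep (count, newarr)).2 ∧
      (arr.foldl pvAStep (count, newarr)).2.toFinset = arr.foldl mstep newarr.toFinset := by
  induction arr with
  | nil => intro count newarr h; exact ⟨h, rfl⟩
  | cons num rest ih =>
    intro count newarr h
    obtain ⟨hstep, hrel⟩ := aStep_spec h num
    simp only [List.foldl_cons, hstep]
    obtain ⟨h1, h2⟩ := ih _ _ hrel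
    refine ⟨h1, ?_⟩
    rw [h2]
    congr 1
    simp [mstep, List.toFinset_append]

theorem foldl_add_eq_sum (l : List Int) : ∀ c : Int, l.foldl (fun s n => s + n) c = c + l.sum := by
  induction l with
  | nil => intro c; simp
  | cons x t ih => intro c; simp only [List.foldl_cons, List.sum_cons]; rw [ih]; ring

theorem sum_toFinset_eq (l : List Int) (h : l.Nodup) : (∑ x ∈ l.toFinset, x) = l.sum := by
  induction l with
  | nil => simp
  | cons x t ih =>
    simp only [List.toFinset_cons, List.sum_cons]
    rw [Finset.sum_insert (by simpa using (List.nodup_cons.mp h).1), ih (List.nodup_cons.mp h).2]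

theorem getUniqueUserIdSum_eq_sum (arr : List Int) :
    getUniqueUserIdSum arr = ∑ x ∈ arr.foldl mstep (∅ : Finset ℤ), x := by
  obtain ⟨⟨hnd, _⟩, hfin⟩ := aLoop_spec arr PySem.Dict.empty []
    ⟨List.nodup_nil, by simp [PySem.Dict.keys, PySem.Dict.empty]⟩
  unfold getUniqueUserIdSum
  rw [foldl_add_eq_sum, zero_add]
  rw [← sum_toFinset_eq _ hnd, hfin]
  simp

-- ===== B-side: on a sorted list the probe is max(v, prev+1) =====

theorem b_sorted (l : List Int) :
    ∀ (S : Finset ℤ) (p w total : ℤ), l.Pairwise (· ≤ ·) → (∀ x ∈ l, w ≤ x) →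
      (∀ x ∈ S, x ≤ p) → (∀ t, w ≤ t → t ≤ p → t ∈ S) → total = ∑ x ∈ S, x →
      (l.foldl pvBStep (total, some p)).1 = ∑ x ∈ l.foldl mstep S, x := by
  induction l with
  | nil => intro S p w total _ _ _ _ htot; simpa using htot
  | cons v rest ih =>
    intro S p w total hpw hwlb hSp hint htot
    have hwv : w ≤ v := hwlb v List.mem_cons_self
    have hrest_ge : ∀ x ∈ rest, v ≤ x := fun x hx => (List.pairwise_cons.mp hpw).1 x hx
    have hrest_pw : rest.Pairwise (· ≤ ·) := (List.pairwise_cons.mp hpw).2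
    simp only [List.foldl_cons]
    by_cases hvp : p < v
    · have hvnot : v ∉ S := fun hv => absurd (hSp v hv) (by omega)
      have hpr : probe S v = v := probe_of_not_mem hvnot
      have hstep : pvBStep (total, some p) v = (total + v, some v) := by
        simp [pvBStep, hvp]
      have hms : mstep S v = insert v S := by rw [mstep, hpr]
      rw [hstep, hms]
      apply ih (insert v S) v v (total + v) hrest_pw hrest_ge
      · intro x hx
        rcases Finset.mem_insert.mp hx with rfl | hx
        · exact le_rfl
        · have := hSp x hx; omega
      · intro t h1 h2
        have : t = v := by omega
        exact this ▸ Finset.mem_insert_self _ _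
      · rw [Finset.sum_insert hvnot, htot]; ring
    · push_neg at hvp
      have hp1not : p + 1 ∉ S := fun hx => absurd (hSp _ hx) (by omega)
      have hpr : probe S v = p + 1 := by
        apply probe_unique (by omega) hp1not
        intro s h1 h2
        exact hint s (by omega) (by omega)
      have hstep : pvBStep (total, some p) v = (total + (p + 1), some (p + 1)) := by
        simp [pvBStep, not_lt.mpr hvp]
      have hms : mstep S v = insert (p + 1) S := by rw [mstep, hpr]
      rw [hstep, hms]
      apply ih (insert (p + 1) S) (p + 1) v (total + (p + 1)) hrest_pw hrest_ge
      · intro x hx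
        rcases Finset.mem_insert.mp hx with rfl | hx
        · exact le_rfl
        · have := hSp x hx; omega
      · intro t h1 h2
        rcases eq_or_lt_of_le h2 with rfl | hlt
        · exact Finset.mem_insert_self _ _
        · exact Finset.mem_insert_of_mem (hint t (by omega) (by omega))
      · rw [Finset.sum_insert hp1not, htot]; ring

theorem getUniqueUserIdSum_alt_eq_sum (arr : List Int) :
    getUniqueUserIdSum_alt arr = ∑ x ∈ (PySem.List.sorted arr (fun x => x) false).foldl mstep (∅ : Finset ℤ), x := by
  unfold getUniqueUserIdSum_alt
  cases hs : PySem.List.sorted arr (fun x => x) false with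
  | nil => simp
  | cons v rest =>
    have hpw : (v :: rest).Pairwise (· ≤ ·) := by
      have := PySem.List.sorted_pairwise (xs := arr) (key := fun x : Int => x)
      rwa [hs] at this
    have hstep : pvBStep (0, none) v = (v, some v) := by simp [pvBStep]
    simp only [List.foldl_cons, hstep]
    have hms : mstep (∅ : Finset ℤ) v = {v} := by
      rw [mstep, probe_of_not_mem (Finset.notMem_empty v)]
      rfl
    apply b_sorted rest (mstep ∅ v) v v v (List.pairwise_cons.mp hpw).2
      (fun x hx => (List.pairwise_cons.mp hpw).1 x hx)
    · intro x hx
      rw [hms] at hx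
      simp at hx
      omega
    · intro t h1 h2
      have : t = v := by omega
      rw [hms, this]
      exact Finset.mem_singleton_self v
    · rw [hms]; simp

-- ===== VERDICT (by name: the statement is the Claim_ definition above) =====
theorem getUniqueUserIdSum_spec : Claim_equal_getUniqueUserIdSum := by
  intro arr _
  unfold Spec_getUniqueUserIdSum
  rw [getUniqueUserIdSum_eq_sum, getUniqueUserIdSum_alt_eq_sum]
  rw [foldl_mstep_perm (PySem.List.sorted_perm (xs := arr) (key := fun x : Int => x) (rev := false)).symm]
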